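-- pv_equiv track=rewrite | github.com/khloodHassan/ProblemSolving | HackerRanck/algorithms/Hackerland Radio Transmitters.py | hackerlandRadioTransmitters
-- ===== SOURCE A (Python) =====
-- def hackerlandRadioTransmitters(arr, distance):
--     arr.sort()
--
--     transmitters = 0
--     idx = len(arr) - 1
--
--     while idx >= 0:
--         # Iterate twice for distance, once each for cities after / before transmitter
--         for _ in range(2):
--             remaining = distance
--
--             while remaining >= 0 and idx >= 1:
--                 cur, nxt = arr[idx], arr[idx - 1]
--                 diff = cur - nxt
--                 remaining -= diff
--
--                 if remaining >= 0: idx -= 1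
--
--         transmitters += 1
--         idx -= 1
--
--     return transmitters
-- ===== SOURCE B (Python) =====
-- def _upper_bound(a, x, lo):
--     # first index >= lo with a[index] > x (a sorted ascending)
--     hi = len(a)
--     while lo < hi:
--         mid = (lo + hi) // 2
--         if a[mid] <= x:
--             lo = mid + 1
--         else:
--             hi = mid
--     return lo
--
--
-- def hackerlandRadioTransmitters(arr, distance):
--     arr.sort()
--     n = len(arr)
--     count = 0
--     i = 0
--     while i < n:
--         count += 1
--         # binary-search the farthest city within `distance` of the first uncovered city
--         j = _upper_bound(arr, arr[i] + distance, i + 1) - 1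
--         # binary-search past every city the transmitter at arr[j] covers
--         i = _upper_bound(arr, arr[j] + distance, j + 1)
--     return count
-- ===== Notes on version B (the rewrite author's own statement) =====
-- stated objective: faster
-- what changed: Replaces A's element-by-element reverse scan with a decrementing gap budget by a forward loop containing no linear scans at all: each step hand-writes two binary searches (upper bounds over the sorted array) that jump directly to the transmitter position and then past everything it covers, cutting the post-sort traversal from Theta(n) interpreted steps to O(t log n).
import Mathlib
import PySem

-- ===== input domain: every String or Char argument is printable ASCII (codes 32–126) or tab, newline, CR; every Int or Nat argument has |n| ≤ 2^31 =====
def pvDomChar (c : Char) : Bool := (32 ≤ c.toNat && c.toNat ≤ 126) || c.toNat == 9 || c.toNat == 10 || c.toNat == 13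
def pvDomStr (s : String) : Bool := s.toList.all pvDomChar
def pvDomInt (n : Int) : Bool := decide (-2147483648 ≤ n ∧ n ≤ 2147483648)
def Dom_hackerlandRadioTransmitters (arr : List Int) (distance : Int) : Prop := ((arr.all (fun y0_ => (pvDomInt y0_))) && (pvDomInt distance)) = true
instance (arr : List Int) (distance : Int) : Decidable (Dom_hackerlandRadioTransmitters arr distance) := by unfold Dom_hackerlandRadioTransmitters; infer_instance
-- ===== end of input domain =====

-- B replaces A's reverse element-by-element scan with a decrementing gap budget by a
-- forward loop whose per-transmitter work is two hand-written binary searches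
-- (objective: faster; measured faster in a timing run). Both A and B sort `arr`
-- in place; the equivalence proved here is about the return value.

-- ===== PORT A =====

-- arr[i]: every access below happens with 0 ≤ i < len (loop invariant), where pyGetD is exact
def pvAget (a : List Int) (i : Int) : Int := PySem.List.pyGetD a i 0

-- termination helpers (tiny terms, cited by name from decreasing_by)
theorem pvDecA (idx : Int) (h : 1 ≤ idx) : (idx - 1).toNat < idx.toNat := by omega
theorem pvDecB (j idx : Int) (h0 : 0 ≤ idx) (hle : j ≤ idx) :
    (j - 1 + 1).toNat < (idx + 1).toNat := by omega

-- the inner `while remaining >= 0 and idx >= 1` loop; returns the final idx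
-- (when the updated remaining goes negative the loop exits at its next condition check)
def aInner (a : List Int) (remaining idx : Int) : Int :=
  if _h : 0 ≤ remaining ∧ 1 ≤ idx then
    let remaining' := remaining - (pvAget a idx - pvAget a (idx - 1))
    if 0 ≤ remaining' then aInner a remaining' (idx - 1) else idx
  else idx
termination_by idx.toNat
decreasing_by exact pvDecA idx _h.2

theorem aInner_le_aux (a : List Int) :
    ∀ (k : Nat) (r i : Int), i.toNat < k → aInner a r i ≤ i := by
  intro k
  induction k with
  | zero => intro r i h; exact absurd h (Nat.not_lt_zero _)
  | succ k ih =>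
    intro r i h
    rw [aInner]
    split
    · simp only []
      split
      · have := ih (r - (pvAget a i - pvAget a (i - 1))) (i - 1) (by omega)
        omega
      · exact le_refl _
    · exact le_refl _

theorem aInner_le (a : List Int) (r i : Int) : aInner a r i ≤ i :=
  aInner_le_aux a (i.toNat + 1) r i (Nat.lt_succ_self _)

-- the outer `while idx >= 0` loop; `for _ in range(2)` unrolled to two aInner phases
def aOuter (a : List Int) (distance idx transmitters : Int) : Int :=
  if _h : 0 ≤ idx then
    aOuter a distance (aInner a distance (aInner a distance idx) - 1) (transmitters + 1)
  else transmitters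
termination_by (idx + 1).toNat
decreasing_by
  exact pvDecB _ idx _h (le_trans (aInner_le a distance _) (aInner_le a distance idx))

def hackerlandRadioTransmitters (arr : List Int) (distance : Int) : Int :=
  let a := PySem.List.sorted arr (fun x => x) false
  aOuter a distance ((a.length : Int) - 1) 0

-- ===== PORT B =====

-- binary-search midpoint bounds, cited from ubAux's decreasing_by
theorem pvMidBounds (lo hi : Int) (h : lo < hi) :
    lo ≤ PySem.Int.floordiv (lo + hi) 2 ∧ PySem.Int.floordiv (lo + hi) 2 < hi := by
  have h1 := PySem.Int.floordiv_two_mid_bounds (le_of_lt h)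
  have h2 : PySem.Int.floordiv (lo + hi) 2 < hi := by
    rw [PySem.Int.floordiv_lt_iff_lt_mul (by omega : (0:Int) < 2)]
    omega
  exact ⟨h1.1, h2⟩

theorem pvDecU1 (lo hi : Int) (h : lo < hi) :
    (hi - (PySem.Int.floordiv (lo + hi) 2 + 1)).toNat < (hi - lo).toNat := by
  have := pvMidBounds lo hi h; omega

theorem pvDecU2 (lo hi : Int) (h : lo < hi) :
    (PySem.Int.floordiv (lo + hi) 2 - lo).toNat < (hi - lo).toNat := by
  have := pvMidBounds lo hi h; omega

-- `while lo < hi:` of _upper_bound, with hi as explicit state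
def ubAux (a : List Int) (x lo hi : Int) : Int :=
  if _h : lo < hi then
    let mid := PySem.Int.floordiv (lo + hi) 2
    if PySem.List.pyGetD a mid 0 ≤ x then ubAux a x (mid + 1) hi else ubAux a x lo mid
  else lo
termination_by (hi - lo).toNat
decreasing_by
  · exact pvDecU1 lo hi _h
  · exact pvDecU2 lo hi _h

-- _upper_bound(a, x, lo): hi starts at len(a)
def pvUB (a : List Int) (x lo : Int) : Int := ubAux a x lo (a.length : Int)

theorem ubAux_ge_aux (a : List Int) (x : Int) :
    ∀ (k : Nat) (lo hi : Int), (hi - lo).toNat ≤ k → lo ≤ ubAux a x lo hi := by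
  intro k
  induction k with
  | zero =>
    intro lo hi h
    rw [ubAux]
    split
    · next hc => exact absurd hc (by omega)
    · exact le_refl _
  | succ k ih =>
    intro lo hi h
    rw [ubAux]
    split
    · next hc =>
      simp only []
      have hmid := pvMidBounds lo hi hc
      split
      · have := ih (PySem.Int.floordiv (lo + hi) 2 + 1) hi (by omega)
        omega
      · have := ih lo (PySem.Int.floordiv (lo + hi) 2) (by omega)
        omega
    · exact le_refl _

theorem pvUB_ge (a : List Int) (x lo : Int) : lo ≤ pvUB a x lo :=
  ubAux_ge_aux a x ((a.length : Int) - lo).toNat lo (a.length : Int) (le_refl _)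

theorem pvDecV (a : List Int) (d n i : Int) (h : i < n) :
    (n - pvUB a (PySem.List.pyGetD a (pvUB a (PySem.List.pyGetD a i 0 + d) (i + 1) - 1) 0 + d)
      (pvUB a (PySem.List.pyGetD a i 0 + d) (i + 1) - 1 + 1)).toNat < (n - i).toNat := by
  have h1 := pvUB_ge a (PySem.List.pyGetD a i 0 + d) (i + 1)
  have h2 := pvUB_ge a (PySem.List.pyGetD a (pvUB a (PySem.List.pyGetD a i 0 + d) (i + 1) - 1) 0 + d)
      (pvUB a (PySem.List.pyGetD a i 0 + d) (i + 1) - 1 + 1)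
  omega

-- the `while i < n` loop of B
def bLoop (a : List Int) (d n i count : Int) : Int :=
  if _h : i < n then
    let j := pvUB a (PySem.List.pyGetD a i 0 + d) (i + 1) - 1
    bLoop a d n (pvUB a (PySem.List.pyGetD a j 0 + d) (j + 1)) (count + 1)
  else count
termination_by (n - i).toNat
decreasing_by
  exact pvDecV a d n i _h

def hackerlandRadioTransmitters_alt (arr : List Int) (distance : Int) : Int :=
  let a := PySem.List.sorted arr (fun x => x) false
  bLoop a distance (a.length : Int) 0 0

-- ===== PRECONDITION & SPEC =====
def Spec_hackerlandRadioTransmitters (arr : List Int) (distance : Int) (out : Int) : Prop := out = hackerlandRadioTransmitters_alt arr distance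
instance (arr : List Int) (distance : Int) (out : Int) : Decidable (Spec_hackerlandRadioTransmitters arr distance out) := by unfold Spec_hackerlandRadioTransmitters; infer_instance

-- ===== CLAIM (what is proved, stated in full; the proofs are below) =====
def Claim_equal_hackerlandRadioTransmitters : Prop := ∀ (arr : List Int) (distance : Int), Dom_hackerlandRadioTransmitters arr distance → Spec_hackerlandRadioTransmitters arr distance (hackerlandRadioTransmitters arr distance)

-- ===== LEMMAS AND PROOFS =====

-- ---- clean greedy layer (proof-side only) ----

theorem pvDecE (s : Int) (xs : List Int) (f : {y // y ∈ xs} → Bool) :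
    (List.filter f xs.attach).unattach.length < (s :: xs).length := by
  rw [List.length_unattach, List.length_cons]
  exact Nat.lt_succ_of_le ((List.length_filter_le _ _).trans (le_of_eq List.length_attach))

-- last element of the ≤-limit prefix of the list, starting from cur
def lastLe (limit cur : Int) : List Int → Int
  | [] => cur
  | c :: cs => if c ≤ limit then lastLe limit c cs else cur

-- forward greedy count on a (sorted) list
def gF (d : Int) : List Int → Nat
  | [] => 0
  | s :: xs => 1 + gF d (xs.filter (fun c => decide (lastLe (s + d) s xs + d < c)))
termination_by l => l.length
decreasing_by exact pvDecE s xs _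

-- the transmitter positions forward greedy chooses
def gT (d : Int) : List Int → List Int
  | [] => []
  | s :: xs => lastLe (s + d) s xs :: gT d (xs.filter (fun c => decide (lastLe (s + d) s xs + d < c)))
termination_by l => l.length
decreasing_by exact pvDecE s xs _

def negrev (l : List Int) : List Int := l.reverse.map (fun x => -x)

theorem gF_nil (d : Int) : gF d [] = 0 := by rw [gF.eq_def]

theorem gF_cons (d s : Int) (xs : List Int) :
    gF d (s :: xs) = 1 + gF d (xs.filter (fun c => decide (lastLe (s + d) s xs + d < c))) := by
  rw [gF.eq_def]

theorem gT_cons (d s : Int) (xs : List Int) :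
    gT d (s :: xs) =
      lastLe (s + d) s xs :: gT d (xs.filter (fun c => decide (lastLe (s + d) s xs + d < c))) := by
  rw [gT.eq_def]

-- ---- basic lastLe facts ----

theorem lastLe_mem (limit cur : Int) (l : List Int) : lastLe limit cur l ∈ cur :: l := by
  induction l generalizing cur with
  | nil => simp [lastLe]
  | cons c cs ih =>
    rw [lastLe]
    split
    · have := ih c
      simp only [List.mem_cons] at this ⊢
      tauto
    · exact List.mem_cons_self

theorem lastLe_le (limit cur : Int) (l : List Int) (h : cur ≤ limit) :
    lastLe limit cur l ≤ limit := by
  induction l generalizing cur with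
  | nil => exact h
  | cons c cs ih =>
    rw [lastLe]
    split
    · exact ih c (by omega)
    · exact h

theorem lastLe_ge (limit cur : Int) (l : List Int) (hs : l.Pairwise (· ≤ ·))
    (h : ∀ x ∈ l, cur ≤ x) : cur ≤ lastLe limit cur l := by
  induction l generalizing cur with
  | nil => exact le_refl _
  | cons c cs ih =>
    rw [lastLe]
    split
    · have h1 : cur ≤ c := h c List.mem_cons_self
      have h2 : c ≤ lastLe limit c cs :=
        ih c (List.Pairwise.of_cons hs) (fun x hx => (List.pairwise_cons.mp hs).1 x hx)
      omega
    · exact le_refl _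

theorem lastLe_max (limit cur : Int) (l : List Int) (hs : l.Pairwise (· ≤ ·))
    (hc : ∀ x ∈ l, cur ≤ x) (c : Int) (hmem : c ∈ l) (hle : c ≤ limit) :
    c ≤ lastLe limit cur l := by
  induction l generalizing cur with
  | nil => simp at hmem
  | cons y ys ih =>
    rw [lastLe]
    rcases List.mem_cons.mp hmem with rfl | hmem'
    · rw [if_pos hle]
      exact lastLe_ge limit c ys (List.Pairwise.of_cons hs)
        (fun x hx => (List.pairwise_cons.mp hs).1 x hx)
    · have hyc : y ≤ c := (List.pairwise_cons.mp hs).1 c hmem'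
      rw [if_pos (by omega)]
      exact ih y (List.Pairwise.of_cons hs)
        (fun x hx => (List.pairwise_cons.mp hs).1 x hx) hmem' 

-- ---- gT cover facts ----

theorem gT_nil (d : Int) : gT d [] = [] := by rw [gT.eq_def]

theorem gT_length_aux (d : Int) :
    ∀ (k : Nat) (l : List Int), l.length ≤ k → (gT d l).length = gF d l := by
  intro k
  induction k with
  | zero =>
    intro l h
    rw [Nat.le_zero, List.length_eq_zero_iff] at h
    subst h
    rw [gT_nil, gF_nil]
    rfl
  | succ k ih =>
    intro l h
    match l with
    | [] => rw [gT_nil, gF_nil]; rfl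
    | s :: xs =>
      rw [gT_cons, gF_cons, List.length_cons]
      have := ih (xs.filter (fun c => decide (lastLe (s + d) s xs + d < c)))
        (le_trans (List.length_filter_le _ _) (by simp at h; omega))
      omega

theorem gT_length (d : Int) (l : List Int) : (gT d l).length = gF d l :=
  gT_length_aux d l.length l (le_refl _)

theorem gT_mem_aux (d : Int) :
    ∀ (k : Nat) (l : List Int), l.length ≤ k → ∀ t ∈ gT d l, t ∈ l := by
  intro k
  induction k with
  | zero =>
    intro l h
    rw [Nat.le_zero, List.length_eq_zero_iff] at h
    subst h
    rw [gT_nil]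
    exact fun t ht => ht
  | succ k ih =>
    intro l h t ht
    match l with
    | [] => rw [gT_nil] at ht; exact absurd ht (List.not_mem_nil)
    | s :: xs =>
      rw [gT_cons] at ht
      rcases List.mem_cons.mp ht with rfl | h'
      · exact lastLe_mem _ _ _
      · have hmem := ih (xs.filter (fun c => decide (lastLe (s + d) s xs + d < c)))
          (le_trans (List.length_filter_le _ _) (by simp at h; omega)) t h'
        exact List.mem_cons_of_mem _ (List.mem_of_mem_filter hmem)

theorem gT_mem (d : Int) (l : List Int) (t : Int) (h : t ∈ gT d l) : t ∈ l :=
  gT_mem_aux d l.length l (le_refl _) t h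

theorem gT_covers_aux (d : Int) (hd : 0 ≤ d) :
    ∀ (n : Nat) (l : List Int), l.length ≤ n → l.Pairwise (· ≤ ·) →
      ∀ c ∈ l, ∃ t ∈ gT d l, t - d ≤ c ∧ c ≤ t + d := by
  intro n
  induction n with
  | zero =>
    intro l hn _ c hc
    rw [Nat.le_zero, List.length_eq_zero_iff] at hn
    subst hn; simp at hc
  | succ n ih =>
    intro l hn hs c hc
    match l with
    | [] => simp at hc
    | s :: xs =>
      have hhead : ∀ x ∈ xs, s ≤ x := (List.pairwise_cons.mp hs).1
      have hxs : xs.Pairwise (· ≤ ·) := (List.pairwise_cons.mp hs).2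
      set t := lastLe (s + d) s xs with ht
      have ht_ge : s ≤ t := lastLe_ge _ _ _ hxs hhead
      have ht_le : t ≤ s + d := lastLe_le _ _ _ (by omega)
      rw [gT_cons]
      rcases List.mem_cons.mp hc with rfl | hc'
      · exact ⟨t, List.mem_cons_self, by omega, by omega⟩
      · by_cases h2 : t + d < c
        · have hcf : c ∈ xs.filter (fun c => decide (t + d < c)) := by
            simp [List.mem_filter, hc', h2]
          have hlen : (xs.filter (fun c => decide (t + d < c))).length ≤ n := by
            have := List.length_filter_le (fun c => decide (t + d < c)) xs
            simp at hn; omega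
          have hsf : (xs.filter (fun c => decide (t + d < c))).Pairwise (· ≤ ·) :=
            hxs.sublist List.filter_sublist
          obtain ⟨t', ht'm, ht'1, ht'2⟩ := ih _ hlen hsf c hcf
          exact ⟨t', List.mem_cons_of_mem _ ht'm, ht'1, ht'2⟩
        · have hsc : s ≤ c := hhead c hc'
          exact ⟨t, List.mem_cons_self, by omega, by omega⟩

theorem gT_covers (d : Int) (hd : 0 ≤ d) (l : List Int) (hs : l.Pairwise (· ≤ ·))
    (c : Int) (hc : c ∈ l) : ∃ t ∈ gT d l, t - d ≤ c ∧ c ≤ t + d :=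
  gT_covers_aux d hd l.length l (le_refl _) hs c hc

-- ---- optimality: gF is a lower bound for any cover by cities ----

theorem gF_le_cover (d : Int) (hd : 0 ≤ d) (l0 : List Int) (hs : l0.Pairwise (· ≤ ·)) :
    ∀ (N : Nat) (T : List Int) (B : Int), T.length = N →
      (∀ t ∈ T, t ∈ l0) →
      (∀ c ∈ l0, B < c → ∃ t ∈ T, t - d ≤ c ∧ c ≤ t + d) →
      gF d (l0.filter (fun c => decide (B < c))) ≤ N := by
  intro N
  induction N with
  | zero =>
    intro T B hTlen hTmem hcov
    cases hl : l0.filter (fun c => decide (B < c)) with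
    | nil => simp [gF_nil]
    | cons s tl =>
      have hsmem : s ∈ l0.filter (fun c => decide (B < c)) := by rw [hl]; exact List.mem_cons_self
      have hs0 : s ∈ l0 := List.mem_of_mem_filter hsmem
      have hBs : B < s := by simpa using (List.of_mem_filter hsmem)
      obtain ⟨t0, ht0T, _⟩ := hcov s hs0 hBs
      rw [List.length_eq_zero_iff] at hTlen
      simp [hTlen] at ht0T
  | succ N ih =>
    intro T B hTlen hTmem hcov
    cases hl : l0.filter (fun c => decide (B < c)) with
    | nil => simp [gF_nil]
    | cons s tl =>
      have hsort : (s :: tl).Pairwise (· ≤ ·) := by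
        rw [← hl]; exact hs.sublist List.filter_sublist
      have hsmem : s ∈ l0.filter (fun c => decide (B < c)) := by rw [hl]; exact List.mem_cons_self
      have hs0 : s ∈ l0 := List.mem_of_mem_filter hsmem
      have hBs : B < s := by simpa using (List.of_mem_filter hsmem)
      obtain ⟨t0, ht0T, ht0a, ht0b⟩ := hcov s hs0 hBs
      have hhead : ∀ x ∈ tl, s ≤ x := (List.pairwise_cons.mp hsort).1
      have htl : tl.Pairwise (· ≤ ·) := (List.pairwise_cons.mp hsort).2
      set t := lastLe (s + d) s tl with htdef
      have ht_ge : s ≤ t := lastLe_ge _ _ _ htl hhead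
      have ht_le : t ≤ s + d := lastLe_le _ _ _ (by omega)
      -- t0 ≤ t
      have ht0t : t0 ≤ t := by
        by_cases hB0 : B < t0
        · have ht0f : t0 ∈ l0.filter (fun c => decide (B < c)) := by
            simp [List.mem_filter, hTmem t0 ht0T, hB0]
          rw [hl] at ht0f
          rcases List.mem_cons.mp ht0f with rfl | h'
          · exact ht_ge
          · exact lastLe_max _ _ _ htl hhead t0 h' (by omega)
        · omega
      -- the tail after this transmitter, as a filter of l0
      have hstep : tl.filter (fun c => decide (t + d < c)) = l0.filter (fun c => decide (t + d < c)) := by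
        have h1 : tl.filter (fun c => decide (t + d < c))
            = (s :: tl).filter (fun c => decide (t + d < c)) := by
          rw [List.filter_cons]
          simp only [decide_eq_true_eq]
          rw [if_neg (by omega)]
        rw [h1, ← hl, List.filter_filter]
        apply List.filter_congr
        intro x _
        by_cases hx : t + d < x
        · simp [hx, show B < x by omega]
        · simp [hx]
      -- the reduced cover
      have hT'mem : ∀ tt ∈ T.erase t0, tt ∈ l0 := fun tt htt => hTmem tt (List.mem_of_mem_erase htt)
      have hT'len : (T.erase t0).length = N := by
        rw [List.length_erase_of_mem ht0T, hTlen]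
        omega
      have hcov' : ∀ c ∈ l0, t + d < c → ∃ tt ∈ T.erase t0, tt - d ≤ c ∧ c ≤ tt + d := by
        intro c hc hlt
        obtain ⟨tt, httT, htt1, htt2⟩ := hcov c hc (by omega)
        have hne : tt ≠ t0 := by intro h; omega
        exact ⟨tt, (List.mem_erase_of_ne hne).mpr httT, htt1, htt2⟩
      have hrec := ih (T.erase t0) (t + d) hT'len hT'mem hcov'
      rw [gF_cons, ← htdef, hstep]
      omega

-- ---- direction symmetry: gF l = gF (negrev l) on sorted lists ----

theorem mem_negrev (l : List Int) (x : Int) : x ∈ negrev l ↔ -x ∈ l := by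
  unfold negrev
  rw [List.mem_map]
  constructor
  · rintro ⟨v, hv, rfl⟩; simpa using List.mem_reverse.mp hv
  · intro h; exact ⟨-x, List.mem_reverse.mpr h, by ring⟩

theorem negrev_sorted (l : List Int) (hs : l.Pairwise (· ≤ ·)) :
    (negrev l).Pairwise (· ≤ ·) := by
  unfold negrev
  rw [List.pairwise_map, List.pairwise_reverse]
  exact hs.imp (by intro a b h; omega)

theorem negrev_negrev (l : List Int) : negrev (negrev l) = l := by
  simp [negrev, List.map_reverse]

theorem negrev_length (l : List Int) : (negrev l).length = l.length := by
  simp [negrev]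

theorem gF_len_of_neg (d : Int) (hd : d < 0) :
    ∀ (n : Nat) (l : List Int), l.length ≤ n → l.Pairwise (· ≤ ·) → gF d l = l.length := by
  intro n
  induction n with
  | zero =>
    intro l hn _
    rw [Nat.le_zero, List.length_eq_zero_iff] at hn
    subst hn; simp [gF_nil]
  | succ n ih =>
    intro l hn hs
    match l with
    | [] => simp [gF_nil]
    | s :: xs =>
      have hhead : ∀ x ∈ xs, s ≤ x := (List.pairwise_cons.mp hs).1
      have ht : lastLe (s + d) s xs = s := by
        cases xs with
        | nil => rfl
        | cons c cs =>
          rw [lastLe]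
          rw [if_neg (by have := hhead c List.mem_cons_self; omega)]
      have hfilt : xs.filter (fun c => decide (lastLe (s + d) s xs + d < c)) = xs := by
        rw [ht]
        apply List.filter_eq_self.mpr
        intro x hx
        have := hhead x hx
        simp; omega
      have hlen : xs.length ≤ n := by simp at hn; omega
      have hrec := ih xs hlen (List.Pairwise.of_cons hs)
      rw [gF_cons, hfilt, hrec]
      simp
      omega

theorem gF_le_negrev (d : Int) (hd : 0 ≤ d) (l : List Int) (hs : l.Pairwise (· ≤ ·)) :
    gF d l ≤ gF d (negrev l) := by
  cases l with
  | nil => simp [negrev, gF_nil]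
  | cons s xs =>
    have hsn : (negrev (s :: xs)).Pairwise (· ≤ ·) := negrev_sorted _ hs
    have hfilt : (s :: xs).filter (fun c => decide (s - 1 < c)) = s :: xs := by
      apply List.filter_eq_self.mpr
      intro x hx
      rcases List.mem_cons.mp hx with rfl | h'
      · simp
      · have := (List.pairwise_cons.mp hs).1 x h'
        simp; omega
    have := gF_le_cover d hd (s :: xs) hs (gF d (negrev (s :: xs)))
        ((gT d (negrev (s :: xs))).map (fun x => -x)) (s - 1)
        (by rw [List.length_map, gT_length])
        (by
          intro tt htt
          obtain ⟨u, hu, rfl⟩ := List.mem_map.mp htt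
          exact (mem_negrev _ _).mp (by simpa using gT_mem _ _ _ hu))
        (by
          intro c hc _
          obtain ⟨u, hu, hu1, hu2⟩ := gT_covers d hd (negrev (s :: xs)) hsn (-c)
            ((mem_negrev _ _).mpr (by simpa using hc))
          exact ⟨-u, List.mem_map_of_mem hu, by omega, by omega⟩)
    rwa [hfilt] at this

theorem gF_negrev (d : Int) (l : List Int) (hs : l.Pairwise (· ≤ ·)) :
    gF d l = gF d (negrev l) := by
  by_cases hd : 0 ≤ d
  · apply le_antisymm (gF_le_negrev d hd l hs)
    have := gF_le_negrev d hd (negrev l) (negrev_sorted l hs)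
    rwa [negrev_negrev] at this
  · rw [gF_len_of_neg d (by omega) l.length l (le_refl _) hs,
      gF_len_of_neg d (by omega) (negrev l).length (negrev l) (le_refl _) (negrev_sorted l hs),
      negrev_length]

-- ---- shared indexing facts ----

theorem pvBget_eq (a : List Int) (i : Int) : PySem.List.pyGetD a i 0 = pvAget a i := rfl

theorem pvAget_eq (a : List Int) (i : Int) (h0 : 0 ≤ i) (h1 : i < (a.length : Int)) :
    pvAget a i = a[i.toNat]'(by omega) := by
  unfold pvAget
  exact PySem.List.pyGetD_eq_getElem a 0 h0 h1

theorem pvAget_nat (a : List Int) (i : Int) (m : Nat) (h0 : 0 ≤ i) (hm : i.toNat = m)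
    (h1 : m < a.length) : pvAget a i = a[m] := by
  subst hm
  exact pvAget_eq a i h0 (by omega)

theorem sorted_mono (a : List Int) (hs : a.Pairwise (· ≤ ·)) (p q : Nat) (hpq : p ≤ q)
    (hq : q < a.length) : a[p]'(by omega) ≤ a[q] := by
  rcases Nat.lt_or_eq_of_le hpq with h | h
  · exact List.pairwise_iff_getElem.mp hs p q (by omega) hq h
  · subst h; exact le_refl _

theorem filter_drop_eq (a : List Int) (p : Int → Bool) :
    ∀ (k m j : Nat), m ≤ j → j - m ≤ k →
      (∀ (u : Nat) (hu : u < a.length), m ≤ u → u < j → p a[u] = false) →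
      (a.drop m).filter p = (a.drop j).filter p := by
  intro k
  induction k with
  | zero => intro m j hmj hk _; have : m = j := by omega
            subst this; rfl
  | succ k ih =>
    intro m j hmj hk hbound
    by_cases he : m = j
    · subst he; rfl
    · have hmj' : m < j := by omega
      by_cases hm : m < a.length
      · rw [List.drop_eq_getElem_cons hm, List.filter_cons,
          if_neg (by simp [hbound m hm (le_refl _) hmj'])]
        exact ih (m + 1) j (by omega) (by omega)
          (fun u hu h1 h2 => hbound u hu (by omega) h2)
      · rw [List.drop_eq_nil_of_le (by omega), List.drop_eq_nil_of_le (by omega)]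

-- ---- binary-search characterization: pvUB is the upper bound ----

theorem ubAux_spec (a : List Int) (hs : a.Pairwise (· ≤ ·)) (x : Int) :
    ∀ (k : Nat) (lo hi : Int), (hi - lo).toNat ≤ k → 0 ≤ lo → lo ≤ hi → hi ≤ (a.length : Int) →
      lo ≤ ubAux a x lo hi ∧ ubAux a x lo hi ≤ hi ∧
      (∀ u : Int, lo ≤ u → u < ubAux a x lo hi → pvAget a u ≤ x) ∧
      (ubAux a x lo hi < hi → x < pvAget a (ubAux a x lo hi)) := by
  intro k
  induction k with
  | zero =>
    intro lo hi hk h0 hle hn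
    have : lo = hi := by omega
    rw [ubAux, dif_neg (by omega)]
    exact ⟨le_refl _, by omega, fun u h1 h2 => absurd h2 (by omega), fun h => absurd h (by omega)⟩
  | succ k ih =>
    intro lo hi hk h0 hle hn
    by_cases hlt : lo < hi
    · rw [ubAux, dif_pos hlt]
      simp only [pvBget_eq]
      have hmid := pvMidBounds lo hi hlt
      set m := PySem.Int.floordiv (lo + hi) 2 with hmdef
      by_cases hm : pvAget a m ≤ x
      · rw [if_pos hm]
        obtain ⟨r1, r2, r3, r4⟩ := ih (m + 1) hi (by omega) (by omega) (by omega) hn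
        refine ⟨by omega, r2, ?_, r4⟩
        intro u hu1 hu2
        by_cases hum : u ≤ m
        · have hmn : m.toNat < a.length := by omega
          have h1 : pvAget a u = a[u.toNat]'(by omega) := pvAget_eq a u (by omega) (by omega)
          have h2 : pvAget a m = a[m.toNat] := pvAget_eq a m (by omega) (by omega)
          have := sorted_mono a hs u.toNat m.toNat (by omega) hmn
          omega
        · exact r3 u (by omega) hu2
      · rw [if_neg hm]
        obtain ⟨r1, r2, r3, r4⟩ := ih lo m (by omega) h0 (by omega) (by omega)
        refine ⟨r1, by omega, r3, ?_⟩
        intro hlt2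
        by_cases hr : ubAux a x lo m < m
        · exact r4 hr
        · have heq : ubAux a x lo m = m := by omega
          rw [heq]
          omega
    · rw [ubAux, dif_neg hlt]
      exact ⟨le_refl _, by omega, fun u h1 h2 => absurd h2 (by omega), fun h => absurd h (by omega)⟩

theorem pvUB_spec (a : List Int) (hs : a.Pairwise (· ≤ ·)) (x lo : Int)
    (h0 : 0 ≤ lo) (h1 : lo ≤ (a.length : Int)) :
    lo ≤ pvUB a x lo ∧ pvUB a x lo ≤ (a.length : Int) ∧
    (∀ u : Int, lo ≤ u → u < pvUB a x lo → pvAget a u ≤ x) ∧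
    (pvUB a x lo < (a.length : Int) → x < pvAget a (pvUB a x lo)) :=
  ubAux_spec a hs x ((a.length : Int) - lo).toNat lo (a.length : Int) (le_refl _) h0 h1 (le_refl _)

-- ---- boundary form of lastLe on a sorted list ----

theorem lastLe_boundary :
    ∀ (l : List Int), l.Pairwise (· ≤ ·) → ∀ (limit cur : Int) (m : Nat),
      m ≤ l.length →
      (∀ (u : Nat) (hu : u < l.length), u < m → l[u] ≤ limit) →
      (∀ (hm : m < l.length), limit < l[m]) →
      (m = 0 ∧ lastLe limit cur l = cur) ∨
      (1 ≤ m ∧ lastLe limit cur l = l.getD (m - 1) 0) := by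
  intro l
  induction l with
  | nil =>
    intro _ limit cur m hm _ _
    left
    exact ⟨by simpa using hm, rfl⟩
  | cons c cs ih =>
    intro hs limit cur m hm h1 h2
    rw [lastLe]
    by_cases hc : c ≤ limit
    · have hm1 : 1 ≤ m := by
        by_contra h
        have hm0 : m = 0 := by omega
        subst hm0
        have := h2 (by simp)
        simp at this
        omega
      obtain ⟨m', rfl⟩ : ∃ m', m = m' + 1 := ⟨m - 1, by omega⟩
      rw [if_pos hc]
      have hrec := ih (List.Pairwise.of_cons hs) limit c m'
        (by simp at hm ⊢; omega)
        (by
          intro u hu hum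
          have := h1 (u + 1) (by simp at hu ⊢; omega) (by omega)
          simpa using this)
        (by
          intro hm2
          have := h2 (by simp at hm2 ⊢; omega)
          simpa using this)
      rcases hrec with ⟨hm0, he⟩ | ⟨hp, he⟩
      · right
        subst hm0
        refine ⟨by omega, ?_⟩
        simpa using he
      · right
        refine ⟨by omega, ?_⟩
        rw [he]
        obtain ⟨m'', rfl⟩ : ∃ m'', m' = m'' + 1 := ⟨m' - 1, by omega⟩
        simp
    · rw [if_neg hc]
      left
      have hm0 : m = 0 := by
        by_contra h
        have := h1 0 (by simp) (by omega)
        simp at this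
        omega
      exact ⟨hm0, rfl⟩

-- ---- filter of a sorted suffix as a drop ----

theorem filter_gt_drop (a : List Int) (q : Int) (m r : Nat) (hmr : m ≤ r) (hr : r ≤ a.length)
    (h1 : ∀ (u : Nat) (hu : u < a.length), m ≤ u → u < r → a[u] ≤ q)
    (h2 : ∀ (u : Nat) (hu : u < a.length), r ≤ u → q < a[u]) :
    (a.drop m).filter (fun c => decide (q < c)) = a.drop r := by
  have h3 : (a.drop m).drop (r - m) = a.drop r := by
    rw [List.drop_drop]
    congr 1
    omega
  have hfa : ((a.drop m).take (r - m)).filter (fun c => decide (q < c)) = [] := by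
    rw [List.filter_eq_nil_iff]
    intro x hx
    rw [List.mem_iff_getElem] at hx
    obtain ⟨u, hu, heq⟩ := hx
    have hub : u < r - m ∧ m + u < a.length := by
      have := hu
      simp [List.length_take, List.length_drop] at this
      omega
    have hval : a[m + u]'(hub.2) = x := by
      rw [← heq, List.getElem_take, List.getElem_drop]
    have := h1 (m + u) hub.2 (by omega) (by omega)
    rw [hval] at this
    simp
    omega
  have hfb : (a.drop r).filter (fun c => decide (q < c)) = a.drop r := by
    apply List.filter_eq_self.mpr
    intro x hx
    rw [List.mem_iff_getElem] at hx
    obtain ⟨u, hu, heq⟩ := hx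
    have hub : r + u < a.length := by
      have := hu
      simp [List.length_drop] at this
      omega
    have hval : a[r + u]'hub = x := by
      rw [← heq, List.getElem_drop]
    have := h2 (r + u) hub (by omega)
    rw [hval] at this
    simp
    omega
  calc (a.drop m).filter (fun c => decide (q < c))
      = ((a.drop m).take (r - m) ++ (a.drop m).drop (r - m)).filter (fun c => decide (q < c)) := by
        rw [List.take_append_drop]
    _ = a.drop r := by
        rw [h3, List.filter_append, hfa, hfb, List.nil_append]

-- ---- simulation: B's port computes gF ----

theorem bLoop_eq (a : List Int) (d : Int) (hs : a.Pairwise (· ≤ ·)) (hd : 0 ≤ d) :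
    ∀ (k : Nat) (i c : Int), 0 ≤ i → a.length ≤ i.toNat + k →
      bLoop a d (a.length : Int) i c = c + (gF d (a.drop i.toNat) : Int) := by
  intro k
  induction k with
  | zero =>
    intro i c h0 hk
    rw [bLoop, dif_neg (by omega), List.drop_eq_nil_of_le (as := a) (by omega), gF_nil]
    simp
  | succ k ih =>
    intro i c h0 hk
    by_cases hin : i < (a.length : Int)
    · rw [bLoop, dif_pos hin]
      simp only [pvBget_eq]
      obtain ⟨q1, q2, q3, q4⟩ := pvUB_spec a hs (pvAget a i + d) (i + 1) (by omega) (by omega)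
      set r1 := pvUB a (pvAget a i + d) (i + 1) with hr1def
      obtain ⟨p1, p2, p3, p4⟩ := pvUB_spec a hs (pvAget a (r1 - 1) + d) (r1 - 1 + 1)
        (by omega) (by omega)
      set i2 := pvUB a (pvAget a (r1 - 1) + d) (r1 - 1 + 1) with hi2def
      rw [ih i2 (c + 1) (by omega) (by omega)]
      have hidx : i.toNat < a.length := by omega
      have hjidx : (r1 - 1).toNat < a.length := by omega
      have hcur : pvAget a i = a[i.toNat] := pvAget_nat a i _ h0 rfl hidx
      have hjval : pvAget a (r1 - 1) = a[(r1 - 1).toNat] :=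
        pvAget_nat a (r1 - 1) _ (by omega) rfl hjidx
      -- characterize the first binary search as lastLe
      have hlsort : (a.drop (i.toNat + 1)).Pairwise (· ≤ ·) :=
        hs.sublist (List.drop_sublist _ _)
      have hllen : (a.drop (i.toNat + 1)).length = a.length - (i.toNat + 1) :=
        List.length_drop
      have hb := lastLe_boundary (a.drop (i.toNat + 1)) hlsort (pvAget a i + d) (pvAget a i)
        ((r1 - (i + 1)).toNat)
        (by omega)
        (by
          intro u hu hum
          have hq := q3 ((i + 1) + (u : Int)) (by omega) (by omega)
          rw [pvAget_nat a ((i + 1) + (u : Int)) (i.toNat + 1 + u) (by omega) (by omega)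
            (by omega)] at hq
          rw [List.getElem_drop]
          omega)
        (by
          intro hm2
          have hq := q4 (by omega)
          rw [pvAget_nat a r1 (i.toNat + 1 + (r1 - (i + 1)).toNat) (by omega) (by omega)
            (by omega)] at hq
          rw [List.getElem_drop]
          omega)
      have hL : lastLe (pvAget a i + d) (pvAget a i) (a.drop (i.toNat + 1)) = pvAget a (r1 - 1) := by
        rcases hb with ⟨hm0, he⟩ | ⟨hp, he⟩
        · rw [he, hcur]
          exact (pvAget_nat a (r1 - 1) i.toNat (by omega) (by omega) hidx).symm
        · rw [he, List.getD_eq_getElem _ _ (by rw [hllen]; omega), List.getElem_drop]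
          exact (pvAget_nat a (r1 - 1) (i.toNat + 1 + ((r1 - (i + 1)).toNat - 1))
            (by omega) (by omega) (by omega)).symm
      -- unfold one gF step at position i
      have hgf : gF d (a.drop i.toNat)
          = 1 + gF d ((a.drop (i.toNat + 1)).filter
              (fun c => decide (pvAget a (r1 - 1) + d < c))) := by
        rw [List.drop_eq_getElem_cons hidx, gF_cons, ← hcur, hL]
      -- the filtered tail is exactly the suffix the second binary search jumps to
      have hfd : (a.drop (i.toNat + 1)).filter (fun c => decide (pvAget a (r1 - 1) + d < c))
          = a.drop i2.toNat := by
        have hstep : (a.drop (i.toNat + 1)).filter (fun c => decide (pvAget a (r1 - 1) + d < c))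
            = (a.drop ((r1 - 1).toNat + 1)).filter (fun c => decide (pvAget a (r1 - 1) + d < c)) := by
          apply filter_drop_eq a _ ((r1 - 1).toNat + 1 - (i.toNat + 1)) _ _ (by omega) (by omega)
          intro u hu hu1 hu2
          simp only [decide_eq_false_iff_not, not_lt]
          rw [hjval]
          exact le_trans (sorted_mono a hs u (r1 - 1).toNat (by omega) hjidx) (by omega)
        rw [hstep]
        apply filter_gt_drop a (pvAget a (r1 - 1) + d) ((r1 - 1).toNat + 1) i2.toNat
          (by omega) (by omega)
        · intro u hu hu1 hu2
          have hp3 := p3 (u : Int) (by omega) (by omega)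
          rw [pvAget_nat a (u : Int) u (by omega) (by omega) hu] at hp3
          exact hp3
        · intro u hu hu1
          have hp4 := p4 (by omega)
          rw [pvAget_nat a i2 i2.toNat (by omega) rfl (by omega)] at hp4
          have := sorted_mono a hs i2.toNat u hu1 hu
          omega
      rw [hgf, hfd]
      push_cast
      ring
    · rw [bLoop, dif_neg hin, List.drop_eq_nil_of_le (as := a) (by omega), gF_nil]
      simp

-- ---- simulation: A's port computes gF on the negated reverse ----

theorem negrev_append (u v : List Int) : negrev (u ++ v) = negrev v ++ negrev u := by
  simp [negrev]

theorem negrev_take_cons (a : List Int) (m : Nat) (hm : m < a.length) :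
    negrev (a.take (m + 1)) = -a[m] :: negrev (a.take m) := by
  rw [List.take_add_one, List.getElem?_eq_getElem hm, negrev_append]
  simp [negrev]

theorem aInner_spec (a : List Int) (hs : a.Pairwise (· ≤ ·)) :
    ∀ (k : Nat) (idx rem L : Int), 0 ≤ idx → idx < (a.length : Int) → idx.toNat < k →
      L = -(pvAget a idx) + rem →
      0 ≤ aInner a rem idx ∧ aInner a rem idx ≤ idx ∧
      -(pvAget a (aInner a rem idx)) =
        lastLe L (-(pvAget a idx)) (negrev (a.take idx.toNat)) ∧
      (1 ≤ aInner a rem idx → L < -(pvAget a (aInner a rem idx - 1))) := by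
  intro k
  induction k with
  | zero => intro idx rem L h0 h1 hk hL; omega
  | succ k ih =>
    intro idx rem L h0 h1 hk hL
    by_cases hg : 0 ≤ rem ∧ 1 ≤ idx
    · have hm : (idx - 1).toNat < a.length := by omega
      have hmidx : idx.toNat = (idx - 1).toNat + 1 := by omega
      have hcons : negrev (a.take idx.toNat)
          = -a[(idx - 1).toNat] :: negrev (a.take (idx - 1).toNat) := by
        rw [hmidx]; exact negrev_take_cons a _ hm
      have hprev : pvAget a (idx - 1) = a[(idx - 1).toNat] :=
        pvAget_nat a (idx - 1) _ (by omega) rfl hm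
      have hmono : a[(idx - 1).toNat] ≤ a[idx.toNat]'(by omega) := by
        have := sorted_mono a hs (idx - 1).toNat idx.toNat (by omega) (by omega)
        exact this
      have hcur : pvAget a idx = a[idx.toNat]'(by omega) := pvAget_nat a idx _ (by omega) rfl (by omega)
      have hcond : (-a[(idx - 1).toNat] ≤ L) ↔ (0 ≤ rem - (pvAget a idx - pvAget a (idx - 1))) := by
        rw [← hprev]; omega
      by_cases hr : 0 ≤ rem - (pvAget a idx - pvAget a (idx - 1))
      · rw [aInner, dif_pos hg]
        simp only []
        rw [if_pos hr]
        obtain ⟨ih0, ih1, ih2, ih3⟩ := ih (idx - 1) (rem - (pvAget a idx - pvAget a (idx - 1))) L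
          (by omega) (by omega) (by omega) (by omega)
        refine ⟨by omega, by omega, ?_, ih3⟩
        rw [hcons, lastLe, if_pos (hcond.mpr hr), ih2, hprev]
      · rw [aInner, dif_pos hg]
        simp only []
        rw [if_neg hr]
        refine ⟨h0, le_refl _, ?_, ?_⟩
        · rw [hcons, lastLe, if_neg (fun h => hr (hcond.mp h))]
        · intro _
          have : ¬ (-a[(idx - 1).toNat] ≤ L) := fun h => hr (hcond.mp h)
          rw [hprev]; omega
    · rw [aInner, dif_neg hg]
      by_cases hz : 1 ≤ idx
      · have hrem : rem < 0 := by
          rcases not_and_or.mp hg with h | h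
          · omega
          · omega
        have hm : (idx - 1).toNat < a.length := by omega
        have hmidx : idx.toNat = (idx - 1).toNat + 1 := by omega
        have hcons : negrev (a.take idx.toNat)
            = -a[(idx - 1).toNat] :: negrev (a.take (idx - 1).toNat) := by
          rw [hmidx]; exact negrev_take_cons a _ hm
        have hprev : pvAget a (idx - 1) = a[(idx - 1).toNat] :=
          pvAget_nat a (idx - 1) _ (by omega) rfl hm
        have hcur : pvAget a idx = a[idx.toNat]'(by omega) := pvAget_nat a idx _ (by omega) rfl (by omega)
        have hmono : a[(idx - 1).toNat] ≤ a[idx.toNat]'(by omega) := by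
          have := sorted_mono a hs (idx - 1).toNat idx.toNat (by omega) (by omega)
          exact this
        have hstrict : ¬ (-a[(idx - 1).toNat] ≤ L) := by omega
        refine ⟨h0, le_refl _, ?_, ?_⟩
        · rw [hcons, lastLe, if_neg hstrict]
        · intro _; rw [hprev]; omega
      · have hz0 : idx = 0 := by omega
        subst hz0
        refine ⟨le_refl _, le_refl _, ?_, by omega⟩
        rfl

theorem negrev_take_filter (a : List Int) (q : Int) (m j : Nat) (hm : m ≤ j) (hj : j ≤ a.length)
    (hlow : ∀ (u : Nat) (hu : u < a.length), u < m → q < -(a[u]'hu))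
    (hhigh : ∀ (u : Nat) (hu : u < a.length), m ≤ u → u < j → ¬ (q < -(a[u]'hu))) :
    (negrev (a.take j)).filter (fun c => decide (q < c)) = negrev (a.take m) := by
  have hsplit : a.take j = a.take m ++ (a.take j).drop m := by
    conv_lhs => rw [← List.take_append_drop m (a.take j)]
    rw [List.take_take, min_eq_left hm]
  rw [hsplit, negrev_append, List.filter_append]
  have h1 : (negrev ((a.take j).drop m)).filter (fun c => decide (q < c)) = [] := by
    rw [List.filter_eq_nil_iff]
    intro x hx
    have hx' : -x ∈ (a.take j).drop m := (mem_negrev _ _).mp hx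
    rw [List.mem_iff_getElem] at hx'
    obtain ⟨u, hu, heq⟩ := hx'
    have hulen : m + u < a.length ∧ m + u < j := by
      have := hu
      simp [List.length_drop, List.length_take] at this
      omega
    have hval : a[m + u]'(hulen.1) = -x := by
      rw [← heq, List.getElem_drop, List.getElem_take]
    have := hhigh (m + u) hulen.1 (by omega) hulen.2
    rw [hval] at this
    simp
    omega
  have h2 : (negrev (a.take m)).filter (fun c => decide (q < c)) = negrev (a.take m) := by
    apply List.filter_eq_self.mpr
    intro x hx
    have hx' : -x ∈ a.take m := (mem_negrev _ _).mp hx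
    rw [List.mem_iff_getElem] at hx'
    obtain ⟨u, hu, heq⟩ := hx'
    have hulen : u < a.length ∧ u < m := by
      have := hu
      simp [List.length_take] at this
      omega
    have hval : a[u]'(hulen.1) = -x := by rw [← heq, List.getElem_take]
    have := hlow u hulen.1 hulen.2
    rw [hval] at this
    simp
    omega
  rw [h1, h2]
  simp

theorem aOuter_eq (a : List Int) (d : Int) (hs : a.Pairwise (· ≤ ·)) (hd : 0 ≤ d) :
    ∀ (k : Nat) (idx t : Int), idx < (a.length : Int) → idx < (k : Int) →
      aOuter a d idx t = t + (gF d (negrev (a.take (idx + 1).toNat)) : Int) := by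
  intro k
  induction k with
  | zero =>
    intro idx t h1 hk
    rw [aOuter, dif_neg (by omega), show (idx + 1).toNat = 0 by omega]
    simp [negrev, gF_nil]
  | succ k ih =>
    intro idx t h1 hk
    by_cases h0 : 0 ≤ idx
    · obtain ⟨p10, p11, p12, _⟩ :=
        aInner_spec a hs (idx.toNat + 1) idx d (-(pvAget a idx) + d) h0 h1 (by omega) rfl
      set idx1 := aInner a d idx with hidx1
      obtain ⟨p20, p21, p22, p23⟩ :=
        aInner_spec a hs (idx.toNat + 1) idx1 d (-(pvAget a idx1) + d) p10 (by omega) (by omega) rfl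
      set idx2 := aInner a d idx1 with hidx2
      rw [aOuter, dif_pos h0, ← hidx1, ← hidx2]
      have hrec := ih (idx2 - 1) (t + 1) (by omega) (by omega)
      rw [hrec]
      have hm : idx.toNat < a.length := by omega
      have hconsr : negrev (a.take (idx + 1).toNat) = -a[idx.toNat] :: negrev (a.take idx.toNat) := by
        rw [show (idx + 1).toNat = idx.toNat + 1 by omega]
        exact negrev_take_cons a _ hm
      have hcur : pvAget a idx = a[idx.toNat] := pvAget_nat a idx _ h0 rfl hm
      have hL : lastLe (-a[idx.toNat] + d) (-a[idx.toNat]) (negrev (a.take idx.toNat))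
          = -(pvAget a idx1) := by
        rw [← hcur]; exact p12.symm
      have hgf : gF d (negrev (a.take (idx + 1).toNat))
          = 1 + gF d ((negrev (a.take idx.toNat)).filter
              (fun c => decide (-(pvAget a idx1) + d < c))) := by
        rw [hconsr, gF_cons, hL]
      have hfilt : (negrev (a.take idx.toNat)).filter (fun c => decide (-(pvAget a idx1) + d < c))
          = negrev (a.take idx2.toNat) := by
        apply negrev_take_filter a _ idx2.toNat idx.toNat (by omega) (by omega)
        · intro u hu hum
          have h1le : 1 ≤ idx2 := by omega
          have hb := p23 h1le
          have hprev : pvAget a (idx2 - 1) = a[(idx2 - 1).toNat]'(by omega) :=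
            pvAget_nat a (idx2 - 1) _ (by omega) rfl (by omega)
          have hmono : a[u]'(by omega) ≤ a[(idx2 - 1).toNat]'(by omega) :=
            sorted_mono a hs u (idx2 - 1).toNat (by omega) (by omega)
          rw [hprev] at hb
          omega
        · intro u hu hu1 hu2
          have hval2 : pvAget a idx2 = a[idx2.toNat]'(by omega) :=
            pvAget_nat a idx2 _ (by omega) rfl (by omega)
          have hle2 : -(pvAget a idx2) ≤ -(pvAget a idx1) + d := by
            rw [p22]; exact lastLe_le _ _ _ (by omega)
          have hmono : a[idx2.toNat]'(by omega) ≤ a[u]'(by omega) :=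
            sorted_mono a hs idx2.toNat u hu1 (by omega)
          rw [hval2] at hle2
          omega
      rw [hgf, hfilt, show (idx2 - 1 + 1).toNat = idx2.toNat by omega]
      push_cast
      ring
    · rw [aOuter, dif_neg h0, show (idx + 1).toNat = 0 by omega]
      simp [negrev, gF_nil]

-- ---- the d < 0 case: both ports count every city ----

theorem aInner_stop (a : List Int) (rem idx : Int) (h : rem < 0) : aInner a rem idx = idx := by
  rw [aInner, dif_neg (by omega)]

theorem aOuter_dneg (a : List Int) (d : Int) (hd : d < 0) :
    ∀ (k : Nat) (idx t : Int), idx < (k : Int) → -1 ≤ idx →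
      aOuter a d idx t = t + idx + 1 := by
  intro k
  induction k with
  | zero =>
    intro idx t hk h1
    rw [aOuter, dif_neg (by omega)]
    omega
  | succ k ih =>
    intro idx t hk h1
    by_cases h0 : 0 ≤ idx
    · rw [aOuter, dif_pos h0, aInner_stop a d idx hd, aInner_stop a d idx hd,
        ih (idx - 1) (t + 1) (by omega) (by omega)]
      omega
    · rw [aOuter, dif_neg h0]
      omega

theorem bLoop_dneg (a : List Int) (d : Int) (hs : a.Pairwise (· ≤ ·)) (hd : d < 0) :
    ∀ (k : Nat) (i c : Int), 0 ≤ i → i ≤ (a.length : Int) → a.length ≤ i.toNat + k →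
      bLoop a d (a.length : Int) i c = c + ((a.length : Int) - i) := by
  intro k
  induction k with
  | zero =>
    intro i c h0 h1 hk
    rw [bLoop, dif_neg (by omega)]
    omega
  | succ k ih =>
    intro i c h0 h1 hk
    by_cases hin : i < (a.length : Int)
    · have hidx : i.toNat < a.length := by omega
      have hcuri : pvAget a i = a[i.toNat] := pvAget_nat a i _ h0 rfl hidx
      obtain ⟨q1, q2, q3, _⟩ := pvUB_spec a hs (pvAget a i + d) (i + 1) (by omega) (by omega)
      set r1 := pvUB a (pvAget a i + d) (i + 1) with hr1def
      have hr1 : r1 = i + 1 := by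
        by_contra hne
        have hlt : i + 1 < r1 := by omega
        have hq := q3 (i + 1) (le_refl _) hlt
        have hni : pvAget a (i + 1) = a[i.toNat + 1]'(by omega) :=
          pvAget_nat a (i + 1) _ (by omega) (by omega) (by omega)
        have := sorted_mono a hs i.toNat (i.toNat + 1) (by omega) (by omega)
        rw [hni, hcuri] at hq
        omega
      rw [bLoop, dif_pos hin]
      simp only [pvBget_eq]
      rw [← hr1def, hr1, show i + 1 - 1 = i from by ring, ← hr1def, hr1,
        ih (i + 1) (c + 1) (by omega) (by omega) (by omega)]
      omega
    · rw [bLoop, dif_neg hin]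
      omega

-- ===== VERDICT (by name: the statement is the Claim_ definition above) =====
theorem hackerlandRadioTransmitters_spec : Claim_equal_hackerlandRadioTransmitters := by
  intro arr distance _
  unfold Spec_hackerlandRadioTransmitters hackerlandRadioTransmitters hackerlandRadioTransmitters_alt
  simp only []
  set a := PySem.List.sorted arr (fun x => x) false with ha
  have hs : a.Pairwise (· ≤ ·) := by
    have := PySem.List.sorted_pairwise (xs := arr) (key := fun x => x)
    simpa using this
  by_cases hd : 0 ≤ distance
  · have hA := aOuter_eq a distance hs hd (a.length + 1) ((a.length : Int) - 1) 0
      (by omega) (by push_cast; omega)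
    have hB := bLoop_eq a distance hs hd a.length 0 0 (by omega) (by omega)
    rw [hA, hB]
    rw [show ((a.length : Int) - 1 + 1).toNat = a.length by omega, List.take_length,
      Int.toNat_zero, List.drop_zero, ← gF_negrev distance a hs]
  · have hA := aOuter_dneg a distance (by omega) (a.length + 1) ((a.length : Int) - 1) 0
      (by push_cast; omega) (by omega)
    have hB := bLoop_dneg a distance hs (by omega) a.length 0 0 (by omega) (by omega) (by omega)
    rw [hA, hB]
    omega
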